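-- pv_equiv track=rewrite | github.com/huttzza/empty_main_server | lib/data_transform.py | xylist_to_center
-- ===== SOURCE A (Python) =====
-- def xylist_to_center(xyxy_points):
--     for i, xy in enumerate(xyxy_points):
--         x_list = [point[0] for point in xy]
--         y_list = [point[1] for point in xy]
--
--         x_min, x_max = min(x_list), max(x_list)
--         y_min, y_max = min(y_list), max(y_list)
--
--         x = abs(x_max - x_min)
--         y = abs(y_max - y_min)
--
--         xyxy_points[i] = [x, y]
--     return xyxy_points
-- ===== SOURCE B (Python) =====
-- def xylist_to_center(xyxy_points):
--     for i, xy in enumerate(xyxy_points):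
--         first = xy[0]
--         x_min = x_max = first[0]
--         y_min = y_max = first[1]
--         for p in xy[1:]:
--             px, py = p[0], p[1]
--             if px < x_min:
--                 x_min = px
--             elif px > x_max:
--                 x_max = px
--             if py < y_min:
--                 y_min = py
--             elif py > y_max:
--                 y_max = py
--         xyxy_points[i] = [abs(x_max - x_min), abs(y_max - y_min)]
--     return xyxy_points
-- ===== Notes on version B (the rewrite author's own statement) =====
-- stated objective: alternative
-- what changed: Each group is reduced in one pass over its points with four running min/max accumulators seeded from the first point, instead of materialising x/y projection lists and calling min/max four times.
import Mathlib
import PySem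

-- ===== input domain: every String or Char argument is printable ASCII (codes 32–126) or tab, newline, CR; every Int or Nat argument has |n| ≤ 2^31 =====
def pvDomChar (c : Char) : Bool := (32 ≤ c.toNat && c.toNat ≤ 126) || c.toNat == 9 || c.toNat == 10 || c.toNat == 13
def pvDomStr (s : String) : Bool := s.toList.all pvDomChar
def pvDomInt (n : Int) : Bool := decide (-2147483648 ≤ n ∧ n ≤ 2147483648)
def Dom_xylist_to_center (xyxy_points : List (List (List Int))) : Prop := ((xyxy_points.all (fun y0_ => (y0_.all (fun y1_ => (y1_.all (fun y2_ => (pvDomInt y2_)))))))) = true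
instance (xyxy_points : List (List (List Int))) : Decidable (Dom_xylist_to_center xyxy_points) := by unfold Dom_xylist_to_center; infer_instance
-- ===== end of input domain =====

-- B replaces the per-group projection lists + four min/max calls by one pass with four running
-- accumulators (objective: alternative). Python A mutates and returns the same list object; B does
-- the same in-place mutation; the equivalence proved here is about the returned value.

-- ===== PORT A =====
-- A: for each group build x_list/y_list, take min/max of each, store [abs(x_max-x_min), abs(y_max-y_min)].
def xylist_to_center (xyxy_points : List (List (List Int))) : List (List Int) :=
  xyxy_points.map (fun xy =>
    let x_list := xy.map (fun point => ((PySem.List.pyGet? point 0).getD 0))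
    let y_list := xy.map (fun point => ((PySem.List.pyGet? point 1).getD 0))
    let x_min := (PySem.List.min? x_list (fun v => v)).getD 0
    let x_max := (PySem.List.max? x_list (fun v => v)).getD 0
    let y_min := (PySem.List.min? y_list (fun v => v)).getD 0
    let y_max := (PySem.List.max? y_list (fun v => v)).getD 0
    [|x_max - x_min|, |y_max - y_min|])

-- ===== PORT B =====
-- B's inner loop: one pass over the remaining points updating (x_min, x_max, y_min, y_max).
def pvBLoop (rest : List (List Int)) (st : Int × Int × Int × Int) : Int × Int × Int × Int :=
  match rest with
  | [] => st
  | p :: rs =>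
    let px := (PySem.List.pyGet? p 0).getD 0
    let py := (PySem.List.pyGet? p 1).getD 0
    let sx := if px < st.1 then (px, st.2.1) else if px > st.2.1 then (st.1, px) else (st.1, st.2.1)
    let sy := if py < st.2.2.1 then (py, st.2.2.2) else if py > st.2.2.2 then (st.2.2.1, py) else (st.2.2.1, st.2.2.2)
    pvBLoop rs (sx.1, sx.2, sy.1, sy.2)

def xylist_to_center_alt (xyxy_points : List (List (List Int))) : List (List Int) :=
  xyxy_points.map (fun xy =>
    let first := (PySem.List.pyGet? xy 0).getD []
    let x0 := (PySem.List.pyGet? first 0).getD 0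
    let y0 := (PySem.List.pyGet? first 1).getD 0
    let (x_min, x_max, y_min, y_max) := pvBLoop (PySem.List.slice xy (some 1) none) (x0, x0, y0, y0)
    [|x_max - x_min|, |y_max - y_min|])

-- ===== PRECONDITION & SPEC =====
-- Pre_ excludes exactly the inputs where Python A raises: a group with no points (ValueError from min)
-- or a point with fewer than 2 coordinates (point[1] → IndexError).
def Pre_xylist_to_center (xyxy_points : List (List (List Int))) : Prop :=
  ∀ xy ∈ xyxy_points, xy ≠ [] ∧ ∀ p ∈ xy, 2 ≤ p.length
instance (xyxy_points : List (List (List Int))) : Decidable (Pre_xylist_to_center xyxy_points) := by unfold Pre_xylist_to_center; infer_instance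

def pvWitness_xylist_to_center : List (List (List Int)) := [[[1, 2], [4, 7]], [[0, 0]]]

def Spec_xylist_to_center (xyxy_points : List (List (List Int))) (out : List (List Int)) : Prop := out = xylist_to_center_alt xyxy_points
instance (xyxy_points : List (List (List Int))) (out : List (List Int)) : Decidable (Spec_xylist_to_center xyxy_points out) := by unfold Spec_xylist_to_center; infer_instance

-- ===== CLAIM (what is proved, stated in full; the proofs are below) =====
def Claim_equal_xylist_to_center : Prop := ∀ (xyxy_points : List (List (List Int))), Dom_xylist_to_center xyxy_points → Pre_xylist_to_center xyxy_points → Spec_xylist_to_center xyxy_points (xylist_to_center xyxy_points)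

-- ===== LEMMAS AND PROOFS =====

-- B's one-pass loop computes the running min/max folds, provided min ≤ max in each pair.
lemma pvBLoop_foldl (rest : List (List Int)) (a b c d : Int) (hx : a ≤ b) (hy : c ≤ d) :
    pvBLoop rest (a, b, c, d) =
      (rest.foldl (fun m p => min m ((PySem.List.pyGet? p 0).getD 0)) a,
       rest.foldl (fun m p => max m ((PySem.List.pyGet? p 0).getD 0)) b,
       rest.foldl (fun m p => min m ((PySem.List.pyGet? p 1).getD 0)) c,
       rest.foldl (fun m p => max m ((PySem.List.pyGet? p 1).getD 0)) d) := by
  induction rest generalizing a b c d with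
  | nil => simp [pvBLoop]
  | cons p rs ih =>
    simp only [pvBLoop, List.foldl_cons]
    set px := (PySem.List.pyGet? p 0).getD 0 with hpx
    set py := (PySem.List.pyGet? p 1).getD 0 with hpy
    have hsx : (if px < a then (px, b) else if px > b then (a, px) else (a, b)) = (min a px, max b px) := by
      split_ifs <;> refine Prod.ext ?_ ?_ <;> simp <;> omega
    have hsy : (if py < c then (py, d) else if py > d then (c, py) else (c, d)) = (min c py, max d py) := by
      split_ifs <;> refine Prod.ext ?_ ?_ <;> simp <;> omega
    rw [hsx, hsy]
    exact ih (min a px) (max b px) (min c py) (max d py) (by omega) (by omega)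

-- min/max over a cons as running folds (PySem's first-extremal min/max with identity key).
lemma pv_group_eq (xy : List (List Int)) (hne : xy ≠ []) :
    (let x_list := xy.map (fun point => ((PySem.List.pyGet? point 0).getD 0))
     let y_list := xy.map (fun point => ((PySem.List.pyGet? point 1).getD 0))
     let x_min := (PySem.List.min? x_list (fun v => v)).getD 0
     let x_max := (PySem.List.max? x_list (fun v => v)).getD 0
     let y_min := (PySem.List.min? y_list (fun v => v)).getD 0
     let y_max := (PySem.List.max? y_list (fun v => v)).getD 0
     ([|x_max - x_min|, |y_max - y_min|] : List Int)) =
    (let first := (PySem.List.pyGet? xy 0).getD []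
     let x0 := (PySem.List.pyGet? first 0).getD 0
     let y0 := (PySem.List.pyGet? first 1).getD 0
     let (x_min, x_max, y_min, y_max) := pvBLoop (PySem.List.slice xy (some 1) none) (x0, x0, y0, y0)
     [|x_max - x_min|, |y_max - y_min|]) := by
  obtain ⟨p, rest, rfl⟩ := List.exists_cons_of_ne_nil hne
  simp only [List.map_cons]
  rw [PySem.List.min?_id_cons, PySem.List.max?_id_cons, PySem.List.min?_id_cons,
    PySem.List.max?_id_cons]
  have hslice : PySem.List.slice (p :: rest) (some 1) none = rest := by
    simp [PySem.List.slice]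
  have hget : ((PySem.List.pyGet? (p :: rest) 0).getD ([] : List Int)) = p := by
    simp [PySem.List.pyGet?, PySem.List.pyIdx?]
  simp only [hslice, hget]
  rw [pvBLoop_foldl _ _ _ _ _ le_rfl le_rfl]
  simp [List.foldl_map]

-- ===== VERDICT (by name: the statement is the Claim_ definition above) =====
theorem xylist_to_center_spec : Claim_equal_xylist_to_center := by
  intro xyxy_points _ hpre
  unfold Spec_xylist_to_center xylist_to_center xylist_to_center_alt
  apply List.map_congr_left
  intro xy hxy
  exact pv_group_eq xy (hpre xy hxy).1
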